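-- pv_equiv track=rewrite | github.com/Bihan/xla | torch_xla/experimental/xla_sharding.py | _get_sharding_type
-- ===== SOURCE A (Python) =====
-- from typing import Tuple, Union, List, Sequence, Any, Optional
-- from enum import IntEnum
--
-- class ShardingType(IntEnum):
--   # ShardingType enum ID maps to OpSharidng.Type (https://shorturl.at/pvAJX)
--   REPLICATED = 0
--   MAXIMAL = 1
--   TUPLE = 2
--   TILED = 3
--   MANUAL = 4
--   PARTIAL = 5
--
-- def _get_sharding_type(partition_spec: Tuple[Union[int, None]],
--                        num_devices: int) -> ShardingType:
--   sharding_type = ShardingType.TILED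
--   if num_devices == 1:
--     sharding_type = ShardingType.MAXIMAL
--   elif all(d is None for d in partition_spec):
--     sharding_type = ShardingType.REPLICATED
--   elif any(d is None for d in partition_spec):
--     sharding_type = ShardingType.PARTIAL
--   return sharding_type
-- ===== SOURCE B (Python) =====
-- from typing import Tuple, Union
-- from enum import IntEnum
--
-- class ShardingType(IntEnum):
--   REPLICATED = 0
--   MAXIMAL = 1
--   TUPLE = 2
--   TILED = 3
--   MANUAL = 4
--   PARTIAL = 5
--
-- def _merge(state, kind):
--   # join in the 3-point lattice {REPLICATED, TILED} <= PARTIAL, None = identity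
--   if state is None:
--     return kind
--   if state == kind:
--     return state
--   return ShardingType.PARTIAL
--
-- def _get_sharding_type(partition_spec: Tuple[Union[int, None]],
--                        num_devices: int) -> ShardingType:
--   if num_devices == 1:
--     return ShardingType.MAXIMAL
--   state = None  # no element seen yet
--   for d in partition_spec:
--     kind = ShardingType.REPLICATED if d is None else ShardingType.TILED
--     state = _merge(state, kind)
--   return ShardingType.REPLICATED if state is None else ShardingType(state)
-- ===== Notes on version B (the rewrite author's own statement) =====
-- stated objective: alternative
-- what changed: Classifies by folding the spec through a small join-semilattice state machine (per-element kind REPLICATED/TILED, equal kinds kept, mixed kinds absorbed into PARTIAL, empty = REPLICATED) instead of A's assign-then-override all()/any() scans.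
import Mathlib
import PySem

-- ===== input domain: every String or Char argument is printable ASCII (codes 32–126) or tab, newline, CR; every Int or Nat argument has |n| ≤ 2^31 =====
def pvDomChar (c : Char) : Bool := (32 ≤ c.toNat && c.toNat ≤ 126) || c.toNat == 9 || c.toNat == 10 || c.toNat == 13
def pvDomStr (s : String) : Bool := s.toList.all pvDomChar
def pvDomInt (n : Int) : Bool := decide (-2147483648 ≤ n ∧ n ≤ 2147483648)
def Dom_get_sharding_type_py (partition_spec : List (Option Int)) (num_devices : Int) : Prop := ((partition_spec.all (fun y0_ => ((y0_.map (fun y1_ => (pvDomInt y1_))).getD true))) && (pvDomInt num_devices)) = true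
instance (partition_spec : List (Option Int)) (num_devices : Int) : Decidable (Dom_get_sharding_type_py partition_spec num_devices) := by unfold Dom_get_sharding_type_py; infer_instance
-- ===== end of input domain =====

-- B folds the spec through a join-semilattice state machine (per-element kind, mixed kinds
-- absorb to PARTIAL, empty = REPLICATED) instead of A's all()/any() scans; objective: alternative.


-- ===== PORT A =====
def get_sharding_type_py (partition_spec : List (Option Int)) (num_devices : Int) : Int :=
  let sharding_type : Int := 3
  let sharding_type : Int :=
    if num_devices == 1 then 1
    else if partition_spec.all (fun d => d.isNone) then 0
    else if partition_spec.any (fun d => d.isNone) then 5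
    else sharding_type
  sharding_type

-- ===== PORT B =====
-- join in the 3-point lattice {0 (REPLICATED), 3 (TILED)} <= 5 (PARTIAL); none = identity
def pvMerge (state : Option Int) (kind : Int) : Option Int :=
  match state with
  | none => some kind
  | some s => if s == kind then some s else some 5

def get_sharding_type_py_alt (partition_spec : List (Option Int)) (num_devices : Int) : Int :=
  if num_devices == 1 then 1
  else
    let state := partition_spec.foldl
      (fun st d => pvMerge st (if d.isNone then 0 else 3)) none
    match state with
    | none => 0
    | some s => s

-- ===== PRECONDITION & SPEC =====
def Spec_get_sharding_type_py (partition_spec : List (Option Int)) (num_devices : Int) (out : Int) : Prop := out = get_sharding_type_py_alt partition_spec num_devices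
instance (partition_spec : List (Option Int)) (num_devices : Int) (out : Int) : Decidable (Spec_get_sharding_type_py partition_spec num_devices out) := by unfold Spec_get_sharding_type_py; infer_instance

-- ===== CLAIM (what is proved, stated in full; the proofs are below) =====
def Claim_equal_get_sharding_type_py : Prop := ∀ (partition_spec : List (Option Int)) (num_devices : Int), Dom_get_sharding_type_py partition_spec num_devices → Spec_get_sharding_type_py partition_spec num_devices (get_sharding_type_py partition_spec num_devices)

-- ===== LEMMAS AND PROOFS =====
theorem pv_fold5 (l : List (Option Int)) :
    l.foldl (fun st d => pvMerge st (if d.isNone then 0 else 3)) (some 5) = some 5 := by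
  induction l with
  | nil => rfl
  | cons d l ih => cases d <;> exact ih

theorem pv_fold0 (l : List (Option Int)) :
    l.foldl (fun st d => pvMerge st (if d.isNone then 0 else 3)) (some 0)
      = if l.all (fun d => d.isNone) then some 0 else some 5 := by
  induction l with
  | nil => rfl
  | cons d l ih =>
    cases d with
    | none =>
      show l.foldl (fun st d => pvMerge st (if d.isNone then 0 else 3)) (some 0) = _
      rw [ih]
      simp
    | some v =>
      show l.foldl (fun st d => pvMerge st (if d.isNone then 0 else 3)) (some 5) = _
      rw [pv_fold5]
      simp

theorem pv_fold3 (l : List (Option Int)) :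
    l.foldl (fun st d => pvMerge st (if d.isNone then 0 else 3)) (some 3)
      = if l.all (fun d => !d.isNone) then some 3 else some 5 := by
  induction l with
  | nil => rfl
  | cons d l ih =>
    cases d with
    | none =>
      show l.foldl (fun st d => pvMerge st (if d.isNone then 0 else 3)) (some 5) = _
      rw [pv_fold5]
      simp
    | some v =>
      show l.foldl (fun st d => pvMerge st (if d.isNone then 0 else 3)) (some 3) = _
      rw [ih]
      simp

-- ===== VERDICT (by name: the statement is the Claim_ definition above) =====
theorem get_sharding_type_py_spec : Claim_equal_get_sharding_type_py := by
  intro ps nd _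
  unfold Spec_get_sharding_type_py get_sharding_type_py get_sharding_type_py_alt
  by_cases h1 : (nd == 1) = true
  · simp only [h1, if_true]
  · simp only [h1, if_false, Bool.false_eq_true]
    cases ps with
    | nil => rfl
    | cons d l =>
      cases d with
      | none =>
        show _ = (match l.foldl (fun st d => pvMerge st (if d.isNone then 0 else 3)) (some 0) with
                  | none => (0 : Int) | some s => s)
        rw [pv_fold0]
        by_cases hall : l.all (fun d => d.isNone) = true <;>
          simp [hall, List.all_cons, List.any_cons]
      | some v =>
        show _ = (match l.foldl (fun st d => pvMerge st (if d.isNone then 0 else 3)) (some 3) with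
                  | none => (0 : Int) | some s => s)
        rw [pv_fold3]
        by_cases hall : l.all (fun d => !d.isNone) = true
        · have hsome : ∀ x ∈ l, x.isSome = true := by
            intro x hx
            have := List.all_eq_true.mp hall x hx
            cases x <;> simp_all
          have hany : l.any (fun d => d.isNone) = false := by
            rw [List.any_eq_false]
            intro x hx
            cases x with
            | none => simpa using hsome none hx
            | some w => simp
          rw [if_pos hall]
          simp [hany, List.all_cons, List.any_cons]
        · have hex : ∃ x ∈ l, x.isNone = true := by
            simpa [List.all_eq_true] using hall
          have hany : l.any (fun d => d.isNone) = true := List.any_eq_true.mpr hex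
          rw [if_neg hall]
          simp [hany, List.all_cons, List.any_cons]
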